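-- pv_equiv track=rewrite | github.com/Rachel-3/2024-Algorithm-Study | chaerim/Programmers/Level_1/Lv1_가장_많이_받은_선물.py | solution
-- ===== SOURCE A (Python) =====
-- def solution(friends, gifts):
--     gifts_exchange = {f: {t: 0 for t in friends if t != f} for f in friends}
--
--     for gift in gifts:
--         giver, receiver = gift.split()
--         gifts_exchange[giver][receiver] += 1
--
--     gift_index = {f: 0 for f in friends}
--     for giver in gifts_exchange:
--         for receiver in gifts_exchange[giver]:
--             gift_index[giver] += gifts_exchange[giver][receiver]
--             gift_index[receiver] -= gifts_exchange[giver][receiver]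
--
--     next_month_gifts = {friend: 0 for friend in friends}
--     processed_pairs = set()
--
--     for f1 in friends:
--         for f2 in friends:
--             if f1 != f2 and (f2, f1) not in processed_pairs:
--                 g_to_r = gifts_exchange[f1].get(f2, 0)
--                 r_to_g = gifts_exchange[f2].get(f1, 0)
--
--                 if g_to_r > r_to_g:
--                     next_month_gifts[f1] += 1
--                 elif g_to_r < r_to_g:
--                     next_month_gifts[f2] += 1
--                 else:
--                     if gift_index[f1] > gift_index[f2]:
--                         next_month_gifts[f1] += 1
--                     elif gift_index[f1] < gift_index[f2]:
--                         next_month_gifts[f2] += 1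
--                     else:
--                         pass
--
--                 processed_pairs.add((f1, f2))
--
--     max_gifts = max(next_month_gifts.values())
--
--     return max_gifts
-- ===== SOURCE B (Python) =====
-- def solution(friends, gifts):
--     # Direct counting over the split gift list: no n*n matrix, no second
--     # double loop recomputing gift_index, no processed_pairs bookkeeping.
--     pairs = [g.split() for g in gifts]
--
--     index = {f: 0 for f in friends}
--     for a, b in pairs:
--         index[a] += 1
--         index[b] -= 1
--
--     def count(x, y):
--         return pairs.count([x, y])
--
--     def beats(x, y):
--         cx, cy = count(x, y), count(y, x)
--         return cx > cy or (cx == cy and index[x] > index[y])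
--
--     return max(sum(1 for g in friends if g != f and beats(f, g)) for f in friends)
-- ===== Notes on version B (the rewrite author's own statement) =====
-- stated objective: simpler
-- what changed: Replaces the dense n-by-n nested dict, the second double loop that rescans it for gift_index, and the processed_pairs set by a one-pass per-friend index dict plus direct counting over the once-split gift list (count/beats) and a single max over per-friend win counts; Pre_ excludes inputs where A raises (empty friends, a gift not naming two distinct known friends) and friends lists with duplicate names alongside non-empty gifts, an unspecified corner where A compares the same pair of people repeatedly.
-- outside the precondition, e.g. on solution(['a', 'b', 'a'], ['a b']): A returns 2, B returns 1
import Mathlib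
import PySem

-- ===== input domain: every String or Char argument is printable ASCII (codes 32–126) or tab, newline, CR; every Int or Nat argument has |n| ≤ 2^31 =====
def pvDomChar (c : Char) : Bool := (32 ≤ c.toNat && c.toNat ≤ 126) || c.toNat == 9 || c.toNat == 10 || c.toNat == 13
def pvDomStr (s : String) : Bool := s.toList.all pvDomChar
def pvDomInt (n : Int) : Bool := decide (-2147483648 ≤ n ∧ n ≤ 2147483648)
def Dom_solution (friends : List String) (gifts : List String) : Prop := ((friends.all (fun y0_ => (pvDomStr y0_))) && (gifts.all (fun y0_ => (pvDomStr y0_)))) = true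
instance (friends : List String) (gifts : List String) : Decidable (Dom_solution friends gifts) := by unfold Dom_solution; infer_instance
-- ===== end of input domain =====

-- B replaces A's dense n×n nested dict, its second double loop recomputing gift_index and its
-- processed_pairs set by direct counting over the once-split gift list (simpler, not faster).

-- ===== PORT A =====

-- {t: 0 for t in friends if t != f}
def pvA_innerInit (friends : List String) (f : String) : PySem.Dict String Int :=
  friends.foldl (fun inner t => if t ≠ f then inner.insert t 0 else inner) PySem.Dict.empty

-- gifts_exchange = {f: {...} for f in friends}
def pvA_geInit (friends : List String) : PySem.Dict String (PySem.Dict String Int) :=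
  friends.foldl (fun d f => d.insert f (pvA_innerInit friends f)) PySem.Dict.empty

-- giver, receiver = gift.split(); gifts_exchange[giver][receiver] += 1
-- (a gift not splitting into exactly two tokens raises ValueError in Python; a missing key raises
--  KeyError; both are excluded by Pre_, so the fall-through/defaults below are never reached there)
def pvA_geStep (d : PySem.Dict String (PySem.Dict String Int)) (g : String) :
    PySem.Dict String (PySem.Dict String Int) :=
  match PySem.Str.split₀ g with
  | [giver, receiver] =>
      d.modify giver PySem.Dict.empty (fun inner => inner.modify receiver 0 (· + 1))
  | _ => d

def pvA_ge (friends gifts : List String) : PySem.Dict String (PySem.Dict String Int) :=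
  gifts.foldl pvA_geStep (pvA_geInit friends)

-- {f: 0 for f in friends}
def pvA_zeroDict (friends : List String) : PySem.Dict String Int :=
  friends.foldl (fun d f => d.insert f 0) PySem.Dict.empty

-- the double loop accumulating gift_index
def pvA_gi (friends gifts : List String) : PySem.Dict String Int :=
  (pvA_ge friends gifts).keys.foldl (fun acc giver =>
    ((pvA_ge friends gifts).getD giver PySem.Dict.empty).keys.foldl (fun acc receiver =>
      (acc.modify giver 0
          (· + ((pvA_ge friends gifts).getD giver PySem.Dict.empty).getD receiver 0)).modify
        receiver 0
        (fun v => v - ((pvA_ge friends gifts).getD giver PySem.Dict.empty).getD receiver 0)) acc)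
    (pvA_zeroDict friends)

-- the body of the inner f2-loop (C/G are the gifts_exchange/gift_index lookups of A)
def pvA_pairBody (C : String → String → Int) (G : String → Int) (f1 : String)
    (st : PySem.Dict String Int × PySem.Set (String × String)) (f2 : String) :
    PySem.Dict String Int × PySem.Set (String × String) :=
  if f1 ≠ f2 ∧ (f2, f1) ∉ st.2 then
    let g_to_r := C f1 f2
    let r_to_g := C f2 f1
    let nmg :=
      if g_to_r > r_to_g then st.1.modify f1 0 (· + 1)
      else if g_to_r < r_to_g then st.1.modify f2 0 (· + 1)
      else if G f1 > G f2 then st.1.modify f1 0 (· + 1)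
      else if G f1 < G f2 then st.1.modify f2 0 (· + 1)
      else st.1
    (nmg, PySem.Set.add st.2 (f1, f2))
  else st

def solution (friends : List String) (gifts : List String) : Int :=
  match (PySem.List.max?
      ((friends.foldl (fun st f1 =>
          friends.foldl
            (pvA_pairBody (fun a b => ((pvA_ge friends gifts).getD a PySem.Dict.empty).getD b 0)
              (fun f => (pvA_gi friends gifts).getD f 0) f1) st)
        (pvA_zeroDict friends, (PySem.Set.empty : PySem.Set (String × String))))).1.values
      (fun x => x)) with
  | some m => m
  | none => 0   -- max() of an empty dict raises ValueError (friends = []), excluded by Pre_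

-- ===== PORT B =====

def pvB_count (pairs : List (List String)) (a b : String) : Int :=
  pairs.count [a, b]

-- index = {f: 0 for f in friends}; for a, b in pairs: index[a] += 1; index[b] -= 1
-- (unpacking a non-2-token p raises ValueError, an unknown name raises KeyError — outside Pre_,
--  where the fall-through/defaults below are never reached)
def pvB_index (friends : List String) (pairs : List (List String)) : PySem.Dict String Int :=
  pairs.foldl (fun d p =>
      match p with
      | [a, b] => (d.modify a 0 (· + 1)).modify b 0 (fun v => v - 1)
      | _ => d)
    (friends.foldl (fun d f => d.insert f (0 : Int)) PySem.Dict.empty)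

def pvB_beats (pairs : List (List String)) (idx : PySem.Dict String Int) (a b : String) : Bool :=
  decide (pvB_count pairs a b > pvB_count pairs b a)
    || (decide (pvB_count pairs a b = pvB_count pairs b a)
        && decide (idx.getD a 0 > idx.getD b 0))

def solution_alt (friends : List String) (gifts : List String) : Int :=
  match PySem.List.max? (friends.map (fun f =>
      (friends.countP (fun g => decide (g ≠ f)
        && pvB_beats (gifts.map (fun g' => PySem.Str.split₀ g'))
          (pvB_index friends (gifts.map (fun g' => PySem.Str.split₀ g'))) f g) : Int)))
      (fun x => x) with
  | some m => m
  | none => 0   -- max() of an empty generator raises ValueError (friends = []), excluded by Pre_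

-- ===== PRECONDITION & SPEC =====
-- Pre_ excludes (a) inputs on which A raises: empty friends (ValueError from max), and any gift that
-- does not split into exactly two distinct names both in friends (KeyError / unpacking ValueError);
-- and (b) friends lists with duplicate names combined with a non-empty gift list: with a duplicated
-- name the per-pair comparison is no longer well defined (the same pair of people occurs several
-- times), A then counts some pairs repeatedly while B counts each pair of names once — an
-- unspecified degenerate corner where either reading is defensible.
def Pre_solution (friends : List String) (gifts : List String) : Prop :=
  friends ≠ [] ∧ (friends.Nodup ∨ gifts = []) ∧
    ∀ g ∈ gifts, ∃ a ∈ friends, ∃ b ∈ friends, a ≠ b ∧ PySem.Str.split₀ g = [a, b]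
instance (friends : List String) (gifts : List String) : Decidable (Pre_solution friends gifts) := by
  unfold Pre_solution; infer_instance

def pvWitness_solution : List String × List String := (["muzi", "ryan"], ["muzi ryan"])

def Spec_solution (friends : List String) (gifts : List String) (out : Int) : Prop :=
  out = solution_alt friends gifts
instance (friends : List String) (gifts : List String) (out : Int) :
    Decidable (Spec_solution friends gifts out) := by unfold Spec_solution; infer_instance

-- ===== CLAIM (what is proved, stated in full; the proofs are below) =====
def Claim_equal_solution : Prop := ∀ (friends : List String) (gifts : List String),
  Dom_solution friends gifts → Pre_solution friends gifts →
    Spec_solution friends gifts (solution friends gifts)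

-- ===== LEMMAS AND PROOFS =====

-- the winner of one pair comparison in A's inner loop, as a value
def pvWin (C : String → String → Int) (G : String → Int) (a b : String) : Option String :=
  if C a b > C b a then some a
  else if C a b < C b a then some b
  else if G a > G b then some a
  else if G a < G b then some b
  else none

-- B's beats predicate over abstract lookups
def pvBeatsF (C : String → String → Int) (G : String → Int) (a b : String) : Bool :=
  decide (C a b > C b a) || (decide (C a b = C b a) && decide (G a > G b))

-- per-round win counts of A's outer loop, f1 ranging over post, pre the already-scanned prefix
def pvRounds (C : String → String → Int) (G : String → Int) (friends : List String) (f : String) :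
    List String → List String → Int
  | _pre, [] => 0
  | pre, f1 :: post =>
      ((friends.filter (fun f2 => decide (f1 ≠ f2) && decide (f2 ∉ pre))).countP
          (fun f2 => decide (pvWin C G f1 f2 = some f)) : Int)
        + pvRounds C G friends f (pre ++ [f1]) post

-- ---- small generic list/dict facts ----

theorem pv_foldl_insert_zero_getD (l : List String) (d : PySem.Dict String Int) (f : String)
    (h : d.getD f 0 = 0) : (l.foldl (fun d x => d.insert x (0 : Int)) d).getD f 0 = 0 := by
  induction l generalizing d with
  | nil => simpa using h
  | cons x t ih =>
      simp only [List.foldl_cons]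
      apply ih
      rw [PySem.Dict.getD_insert]
      split <;> simp [h]

theorem pv_foldl_insert_getD_not_mem {ν : Type} (l : List String) (v : String → ν)
    (d : PySem.Dict String ν) (a : String) (dflt : ν) (h : a ∉ l) :
    (l.foldl (fun d x => d.insert x (v x)) d).getD a dflt = d.getD a dflt := by
  induction l generalizing d with
  | nil => rfl
  | cons x t ih =>
      simp only [List.foldl_cons]
      rw [ih (d.insert x (v x)) (fun hm => h (List.mem_cons_of_mem _ hm)),
        PySem.Dict.getD_insert, if_neg (by rintro rfl; exact h List.mem_cons_self)]

theorem pv_foldl_insert_getD_mem {ν : Type} (l : List String) (v : String → ν)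
    (d : PySem.Dict String ν) (a : String) (dflt : ν) (hnd : l.Nodup) (h : a ∈ l) :
    (l.foldl (fun d x => d.insert x (v x)) d).getD a dflt = v a := by
  induction l generalizing d with
  | nil => cases h
  | cons x t ih =>
      simp only [List.foldl_cons]
      rcases List.mem_cons.1 h with hax | hat
      · subst hax
        rw [pv_foldl_insert_getD_not_mem t v _ a dflt (List.nodup_cons.1 hnd).1,
          PySem.Dict.getD_insert, if_pos rfl]
      · exact ih (d.insert x (v x)) (List.nodup_cons.1 hnd).2 hat

theorem pv_sum_pick0 (l : List String) (f : String) (F : String → Int) (h : f ∉ l) :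
    (l.map (fun g => if f = g then F g else 0)).sum = 0 := by
  induction l with
  | nil => rfl
  | cons x t ih =>
      simp only [List.map_cons, List.sum_cons]
      rw [if_neg (by rintro rfl; exact h List.mem_cons_self),
        ih (fun hm => h (List.mem_cons_of_mem _ hm))]
      ring

theorem pv_sum_pick (l : List String) (f : String) (F : String → Int) (hnd : l.Nodup) (h : f ∈ l) :
    (l.map (fun g => if f = g then F g else 0)).sum = F f := by
  induction l with
  | nil => cases h
  | cons x t ih =>
      simp only [List.map_cons, List.sum_cons]
      rcases List.mem_cons.1 h with hfx | hft
      · subst hfx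
        rw [if_pos rfl, pv_sum_pick0 t f F (List.nodup_cons.1 hnd).1]
        ring
      · rw [if_neg (by rintro rfl; exact (List.nodup_cons.1 hnd).1 hft),
          ih (List.nodup_cons.1 hnd).2 hft]
        ring

-- ---- A's gifts_exchange counts gifts ----

theorem pv_sum_map_sub {α : Type} (l : List α) (F G : α → Int) :
    (l.map (fun x => F x - G x)).sum = (l.map F).sum - (l.map G).sum := by
  induction l with
  | nil => simp
  | cons x t ih => simp only [List.map_cons, List.sum_cons, ih]; ring

theorem pv_sum_unpick (l : List String) (f : String) (F : String → Int) :
    ((l.filter (fun g => g ≠ f)).map F).sum = (l.map (fun g => if f = g then 0 else F g)).sum := by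
  induction l with
  | nil => rfl
  | cons x t ih =>
      by_cases hxf : x = f
      · subst hxf
        rw [List.filter_cons_of_neg (by simp), List.map_cons, List.sum_cons, if_pos rfl, ih]
        ring
      · rw [List.filter_cons_of_pos (by simpa using hxf), List.map_cons, List.map_cons,
          List.sum_cons, List.sum_cons, if_neg (fun h => hxf h.symm), ih]

theorem pv_innerInit_getD (l : List String) (f : String) (d : PySem.Dict String Int) (b : String)
    (h : d.getD b 0 = 0) :
    (l.foldl (fun inner t => if t ≠ f then inner.insert t (0 : Int) else inner) d).getD b 0 = 0 := by
  induction l generalizing d with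
  | nil => simpa using h
  | cons x t ih =>
      simp only [List.foldl_cons]
      apply ih
      split
      · rw [PySem.Dict.getD_insert]; split <;> simp [h]
      · exact h

theorem pv_ge_getD (gifts : List String) (d : PySem.Dict String (PySem.Dict String Int))
    (a b : String) :
    ((gifts.foldl pvA_geStep d).getD a PySem.Dict.empty).getD b 0
      = (d.getD a PySem.Dict.empty).getD b 0 + ((gifts.map PySem.Str.split₀).count [a, b] : Int) := by
  induction gifts generalizing d with
  | nil => simp
  | cons g t ih =>
      simp only [List.foldl_cons, List.map_cons]
      rw [ih (pvA_geStep d g)]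
      have hstep : ((pvA_geStep d g).getD a PySem.Dict.empty).getD b 0
          = (d.getD a PySem.Dict.empty).getD b 0
            + (if PySem.Str.split₀ g = [a, b] then (1 : Int) else 0) := by
        unfold pvA_geStep
        rcases hs : PySem.Str.split₀ g with _ | ⟨x, _ | ⟨y, _ | ⟨z, r⟩⟩⟩
        · simp
        · simp
        · rw [PySem.Dict.getD_modify]
          by_cases hax : a = x
          · subst hax
            rw [if_pos rfl, PySem.Dict.getD_modify]
            by_cases hby : b = y
            · subst hby; simp
            · rw [if_neg hby, if_neg (by simp [eq_comm, hby])]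
              ring
          · rw [if_neg hax, if_neg (by simp [eq_comm, hax])]
            ring
        · simp
      rw [hstep, List.count_cons]
      by_cases hab : PySem.Str.split₀ g = [a, b]
      · rw [if_pos hab, if_pos (by simpa using hab)]
        push_cast
        ring
      · rw [if_neg hab, if_neg (by simpa using hab)]
        push_cast
        ring

theorem pv_geA_count (friends gifts : List String) (hnd : friends.Nodup) (a : String)
    (ha : a ∈ friends) (b : String) :
    ((pvA_ge friends gifts).getD a PySem.Dict.empty).getD b 0
      = ((gifts.map PySem.Str.split₀).count [a, b] : Int) := by
  unfold pvA_ge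
  rw [pv_ge_getD]
  have h1 : (pvA_geInit friends).getD a PySem.Dict.empty = pvA_innerInit friends a := by
    unfold pvA_geInit
    exact pv_foldl_insert_getD_mem friends _ _ a _ hnd ha
  have h0 : (pvA_innerInit friends a).getD b 0 = 0 := by
    unfold pvA_innerInit
    exact pv_innerInit_getD _ _ _ _ (PySem.Dict.getD_empty _ _)
  rw [h1, h0]
  ring

-- ---- keys of A's dicts ----

theorem pv_innerInit_keys (friends : List String) (f : String) (hnd : friends.Nodup) :
    (pvA_innerInit friends f).keys = friends.filter (fun t => t ≠ f) := by
  unfold pvA_innerInit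
  rw [PySem.List.foldl_ite_eq_foldl_filter (p := fun t => t ≠ f)
    (f := fun (inner : PySem.Dict String Int) t => inner.insert t 0),
    PySem.Dict.keys_foldl_insert _ (fun _ _ => (0 : Int)), PySem.Dict.keys_empty]
  exact PySem.Set.ofList_eq_self_of_nodup _ (hnd.filter _)

theorem pv_geInit_keys (friends : List String) (hnd : friends.Nodup) :
    (pvA_geInit friends).keys = friends := by
  unfold pvA_geInit
  rw [PySem.Dict.keys_foldl_insert _ (fun _ x => pvA_innerInit friends x), PySem.Dict.keys_empty]
  exact PySem.Set.ofList_eq_self_of_nodup _ hnd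

theorem pv_zeroDict_keys (friends : List String) (hnd : friends.Nodup) :
    (pvA_zeroDict friends).keys = friends := by
  unfold pvA_zeroDict
  rw [PySem.Dict.keys_foldl_insert _ (fun _ _ => (0 : Int)), PySem.Dict.keys_empty]
  exact PySem.Set.ofList_eq_self_of_nodup _ hnd

theorem pv_zeroDict_getD (friends : List String) (f : String) :
    (pvA_zeroDict friends).getD f 0 = 0 := by
  unfold pvA_zeroDict
  exact pv_foldl_insert_zero_getD _ _ _ (PySem.Dict.getD_empty _ _)

theorem pv_ge_keys (friends gifts : List String) (hnd : friends.Nodup)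
    (hg : ∀ g ∈ gifts, ∃ a ∈ friends, ∃ b ∈ friends, a ≠ b ∧ PySem.Str.split₀ g = [a, b]) :
    (pvA_ge friends gifts).keys = friends ∧
      ∀ a ∈ friends, ((pvA_ge friends gifts).getD a PySem.Dict.empty).keys
        = friends.filter (fun t => t ≠ a) := by
  have aux : ∀ (gs : List String) (d : PySem.Dict String (PySem.Dict String Int)),
      (∀ g ∈ gs, ∃ a ∈ friends, ∃ b ∈ friends, a ≠ b ∧ PySem.Str.split₀ g = [a, b]) →
      d.keys = friends →
      (∀ a ∈ friends, (d.getD a PySem.Dict.empty).keys = friends.filter (fun t => t ≠ a)) →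
      (gs.foldl pvA_geStep d).keys = friends ∧
        ∀ a ∈ friends, ((gs.foldl pvA_geStep d).getD a PySem.Dict.empty).keys
          = friends.filter (fun t => t ≠ a) := by
    intro gs
    induction gs with
    | nil => intro d _ h1 h2; exact ⟨h1, h2⟩
    | cons g t ih =>
        intro d hgs h1 h2
        simp only [List.foldl_cons]
        obtain ⟨x, hx, y, hy, hxy, hs⟩ := hgs g List.mem_cons_self
        have hstep1 : (pvA_geStep d g).keys = friends := by
          unfold pvA_geStep
          rw [hs, PySem.Dict.keys_modify,
            PySem.Dict.keys_insert_of_contains _ _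
              ((PySem.Dict.contains_iff_mem_keys _ _).2 (h1 ▸ hx))]
          exact h1
        have hstep2 : ∀ a ∈ friends, ((pvA_geStep d g).getD a PySem.Dict.empty).keys
            = friends.filter (fun t => t ≠ a) := by
          intro a ha
          unfold pvA_geStep
          rw [hs, PySem.Dict.getD_modify]
          by_cases hax : a = x
          · subst hax
            rw [if_pos rfl, PySem.Dict.keys_modify,
              PySem.Dict.keys_insert_of_contains _ _
                ((PySem.Dict.contains_iff_mem_keys _ _).2 ?_)]
            · exact h2 _ ha
            · rw [h2 _ ha]
              exact List.mem_filter.2 ⟨hy, by simpa using hxy.symm⟩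
          · rw [if_neg hax]; exact h2 _ ha
        exact ih _ (fun g' hm => hgs g' (List.mem_cons_of_mem _ hm)) hstep1 hstep2
  unfold pvA_ge
  refine aux gifts (pvA_geInit friends) hg (pv_geInit_keys friends hnd) ?_
  intro a ha
  have h1 : (pvA_geInit friends).getD a PySem.Dict.empty = pvA_innerInit friends a := by
    unfold pvA_geInit
    exact pv_foldl_insert_getD_mem friends _ _ a _ hnd ha
  rw [h1]
  exact pv_innerInit_keys friends a hnd

-- ---- gift_index ----

theorem pv_gi_inner (l : List String) (giver : String) (C : String → Int)
    (acc : PySem.Dict String Int) (f : String) :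
    (l.foldl (fun acc r => (acc.modify giver 0 (· + C r)).modify r 0 (fun v => v - C r)) acc).getD f 0
      = acc.getD f 0
        + (l.map (fun r => (if f = giver then C r else 0) - (if f = r then C r else 0))).sum := by
  induction l generalizing acc with
  | nil => simp
  | cons r t ih =>
      simp only [List.foldl_cons, List.map_cons, List.sum_cons]
      rw [ih ((acc.modify giver 0 (· + C r)).modify r 0 (fun v => v - C r))]
      simp only [PySem.Dict.getD_modify]
      split_ifs <;> subst_vars <;> first | omega | (exfalso; simp_all)

theorem pv_gi_getD (friends gifts : List String) (hnd : friends.Nodup)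
    (hg : ∀ g ∈ gifts, ∃ a ∈ friends, ∃ b ∈ friends, a ≠ b ∧ PySem.Str.split₀ g = [a, b])
    (f : String) :
    (pvA_gi friends gifts).getD f 0
      = (friends.map (fun giver =>
          ((friends.filter (fun t => t ≠ giver)).map (fun r =>
            (if f = giver then ((gifts.map PySem.Str.split₀).count [giver, r] : Int) else 0)
              - (if f = r then ((gifts.map PySem.Str.split₀).count [giver, r] : Int) else 0))).sum)).sum := by
  have aux : ∀ (l : List String) (K : String → List String) (Cc : String → String → Int)
      (acc : PySem.Dict String Int),
      (l.foldl (fun acc giver => (K giver).foldl (fun acc r =>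
          (acc.modify giver 0 (· + Cc giver r)).modify r 0 (fun v => v - Cc giver r)) acc)
        acc).getD f 0
        = acc.getD f 0 + (l.map (fun giver => ((K giver).map (fun r =>
            (if f = giver then Cc giver r else 0) - (if f = r then Cc giver r else 0))).sum)).sum := by
    intro l K Cc
    induction l with
    | nil => simp
    | cons gv t ih =>
        intro acc
        simp only [List.foldl_cons, List.map_cons, List.sum_cons]
        rw [ih, pv_gi_inner]
        ring
  obtain ⟨hK, hKi⟩ := pv_ge_keys friends gifts hnd hg
  unfold pvA_gi
  rw [hK]
  rw [aux friends (fun giver => ((pvA_ge friends gifts).getD giver PySem.Dict.empty).keys)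
    (fun giver r => ((pvA_ge friends gifts).getD giver PySem.Dict.empty).getD r 0)
    (pvA_zeroDict friends)]
  rw [pv_zeroDict_getD, zero_add]
  refine congrArg List.sum (List.map_congr_left ?_)
  intro giver hgv
  rw [hKi giver hgv]
  refine congrArg List.sum (List.map_congr_left ?_)
  intro r _
  rw [pv_geA_count friends gifts hnd giver hgv r]

theorem pv_count_split_first (pairs : List (List String)) (friends : List String) (f : String)
    (hnd : friends.Nodup)
    (hp : ∀ p ∈ pairs, ∃ a ∈ friends, ∃ b ∈ friends, a ≠ b ∧ p = [a, b]) :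
    ((friends.filter (fun t => t ≠ f)).map (fun r => (pairs.count [f, r] : Int))).sum
      = (pairs.countP (fun p => PySem.List.pyGetD p 0 "" == f) : Int) := by
  induction pairs with
  | nil => simp
  | cons p rest ih =>
      obtain ⟨x, hx, y, hy, hxy, hp0⟩ := hp p List.mem_cons_self
      subst hp0
      have hrec := ih (fun q hq => hp q (List.mem_cons_of_mem _ hq))
      simp only [List.count_cons, List.countP_cons, beq_iff_eq]
      have hx0 : PySem.List.pyGetD [x, y] 0 "" = x := by
        simp [PySem.List.pyGetD, PySem.List.pyGet?, PySem.List.pyIdx?]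
      rw [hx0]
      have hsplit : ((friends.filter (fun t => t ≠ f)).map
            (fun r => ((rest.count [f, r] + if [x, y] = [f, r] then 1 else 0 : Nat) : Int))).sum
          = ((friends.filter (fun t => t ≠ f)).map (fun r => (rest.count [f, r] : Int))).sum
            + ((friends.filter (fun t => t ≠ f)).map
                (fun r => if x = f ∧ r = y then (1 : Int) else 0)).sum := by
        rw [← PySem.List.sum_map_add_int]
        refine congrArg List.sum (List.map_congr_left ?_)
        intro r _
        by_cases h : x = f ∧ r = y
        · obtain ⟨h1, h2⟩ := h
          subst h1; subst h2
          push_cast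
          simp
        · rw [if_neg h, if_neg (by
              intro hEq
              injection hEq with h1 h2
              injection h2 with h3 _
              exact h ⟨h1, h3.symm⟩)]
          push_cast
          ring
      rw [hsplit, hrec]
      by_cases hxf : x = f
      · subst hxf
        have hone : ((friends.filter (fun t => t ≠ x)).map
              (fun r => if x = x ∧ r = y then (1 : Int) else 0)).sum = 1 := by
          have hcg : ((friends.filter (fun t => t ≠ x)).map
                (fun r => if x = x ∧ r = y then (1 : Int) else 0))
              = ((friends.filter (fun t => t ≠ x)).map
                (fun r => if y = r then (1 : Int) else 0)) := by
            refine List.map_congr_left ?_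
            intro r _
            by_cases h : r = y
            · subst h; simp
            · rw [if_neg (fun hc => h hc.2), if_neg (fun hc => h hc.symm)]
          rw [hcg]
          exact pv_sum_pick _ y (fun _ => 1) (hnd.filter _)
            (List.mem_filter.2 ⟨hy, by simpa using fun h => hxy h.symm⟩)
        rw [hone, if_pos rfl]
        push_cast
        ring
      · have hzero : ((friends.filter (fun t => t ≠ f)).map
              (fun r => if x = f ∧ r = y then (1 : Int) else 0)).sum = 0 := by
          have hcg : ((friends.filter (fun t => t ≠ f)).map
                (fun r => if x = f ∧ r = y then (1 : Int) else 0))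
              = ((friends.filter (fun t => t ≠ f)).map (fun _ => (0 : Int))) := by
            refine List.map_congr_left ?_
            intro r _
            rw [if_neg (fun hc => hxf hc.1)]
          rw [hcg]
          simp
        rw [hzero, if_neg hxf]
        push_cast
        ring

theorem pv_count_split_second (pairs : List (List String)) (friends : List String) (f : String)
    (hnd : friends.Nodup)
    (hp : ∀ p ∈ pairs, ∃ a ∈ friends, ∃ b ∈ friends, a ≠ b ∧ p = [a, b]) :
    ((friends.filter (fun t => t ≠ f)).map (fun g => (pairs.count [g, f] : Int))).sum
      = (pairs.countP (fun p => PySem.List.pyGetD p 1 "" == f) : Int) := by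
  induction pairs with
  | nil => simp
  | cons p rest ih =>
      obtain ⟨x, hx, y, hy, hxy, hp0⟩ := hp p List.mem_cons_self
      subst hp0
      have hrec := ih (fun q hq => hp q (List.mem_cons_of_mem _ hq))
      simp only [List.count_cons, List.countP_cons, beq_iff_eq]
      have hy1 : PySem.List.pyGetD [x, y] 1 "" = y := by
        simp [PySem.List.pyGetD, PySem.List.pyGet?, PySem.List.pyIdx?]
      rw [hy1]
      have hsplit : ((friends.filter (fun t => t ≠ f)).map
            (fun g => ((rest.count [g, f] + if [x, y] = [g, f] then 1 else 0 : Nat) : Int))).sum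
          = ((friends.filter (fun t => t ≠ f)).map (fun g => (rest.count [g, f] : Int))).sum
            + ((friends.filter (fun t => t ≠ f)).map
                (fun g => if y = f ∧ g = x then (1 : Int) else 0)).sum := by
        rw [← PySem.List.sum_map_add_int]
        refine congrArg List.sum (List.map_congr_left ?_)
        intro g _
        by_cases h : y = f ∧ g = x
        · obtain ⟨h1, h2⟩ := h
          subst h1; subst h2
          push_cast
          simp
        · rw [if_neg h, if_neg (by
            intro hEq
            injection hEq with h1 h2
            injection h2 with h3 _
            exact h ⟨h3, h1.symm⟩)]
          push_cast
          ring
      rw [hsplit, hrec]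
      by_cases hyf : y = f
      · subst hyf
        have hone : ((friends.filter (fun t => t ≠ y)).map
              (fun g => if y = y ∧ g = x then (1 : Int) else 0)).sum = 1 := by
          have hcg : ((friends.filter (fun t => t ≠ y)).map
                (fun g => if y = y ∧ g = x then (1 : Int) else 0))
              = ((friends.filter (fun t => t ≠ y)).map
                (fun g => if x = g then (1 : Int) else 0)) := by
            refine List.map_congr_left ?_
            intro g _
            by_cases h : g = x
            · subst h; simp
            · rw [if_neg (fun hc => h hc.2), if_neg (fun hc => h hc.symm)]
          rw [hcg]
          exact pv_sum_pick _ x (fun _ => 1) (hnd.filter _)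
            (List.mem_filter.2 ⟨hx, by simpa using hxy⟩)
        rw [hone, if_pos rfl]
        push_cast
        ring
      · have hzero : ((friends.filter (fun t => t ≠ f)).map
              (fun g => if y = f ∧ g = x then (1 : Int) else 0)).sum = 0 := by
          have hcg : ((friends.filter (fun t => t ≠ f)).map
                (fun g => if y = f ∧ g = x then (1 : Int) else 0))
              = ((friends.filter (fun t => t ≠ f)).map (fun _ => (0 : Int))) := by
            refine List.map_congr_left ?_
            intro g _
            rw [if_neg (fun hc => hyf hc.1)]
          rw [hcg]
          simp
        rw [hzero, if_neg hyf]
        push_cast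
        ring

theorem pv_gi_eq_index (friends gifts : List String) (hnd : friends.Nodup)
    (hg : ∀ g ∈ gifts, ∃ a ∈ friends, ∃ b ∈ friends, a ≠ b ∧ PySem.Str.split₀ g = [a, b])
    (f : String) (hf : f ∈ friends) :
    (pvA_gi friends gifts).getD f 0
      = ((gifts.map PySem.Str.split₀).countP (fun p => PySem.List.pyGetD p 0 "" == f) : Int)
        - ((gifts.map PySem.Str.split₀).countP (fun p => PySem.List.pyGetD p 1 "" == f) : Int) := by
  have hp : ∀ p ∈ gifts.map PySem.Str.split₀,
      ∃ a ∈ friends, ∃ b ∈ friends, a ≠ b ∧ p = [a, b] := by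
    intro p hpm
    obtain ⟨g, hgm, rfl⟩ := List.mem_map.1 hpm
    obtain ⟨a, ha, b, hb, hab, hs⟩ := hg g hgm
    exact ⟨a, ha, b, hb, hab, hs⟩
  rw [pv_gi_getD friends gifts hnd hg f]
  have hinner : ∀ g ∈ friends,
      ((friends.filter (fun t => t ≠ g)).map (fun r =>
        (if f = g then ((gifts.map PySem.Str.split₀).count [g, r] : Int) else 0)
          - (if f = r then ((gifts.map PySem.Str.split₀).count [g, r] : Int) else 0))).sum
      = (if f = g then ((friends.filter (fun t => t ≠ g)).map (fun r =>
            ((gifts.map PySem.Str.split₀).count [g, r] : Int))).sum else 0)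
        - (if f = g then 0 else ((gifts.map PySem.Str.split₀).count [g, f] : Int)) := by
    intro g _
    rw [pv_sum_map_sub]
    congr 1
    · by_cases hfg : f = g
      · rw [if_pos hfg]
        refine congrArg List.sum (List.map_congr_left ?_)
        intro r _
        rw [if_pos hfg]
      · rw [if_neg hfg]
        have hcg : ((friends.filter (fun t => t ≠ g)).map (fun r =>
              if f = g then ((gifts.map PySem.Str.split₀).count [g, r] : Int) else 0))
            = ((friends.filter (fun t => t ≠ g)).map (fun _ => (0 : Int))) := by
          refine List.map_congr_left ?_
          intro r _
          rw [if_neg hfg]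
        rw [hcg]
        simp
    · by_cases hfg : f = g
      · rw [if_pos hfg]
        subst hfg
        exact pv_sum_pick0 _ f _ (by simp)
      · rw [if_neg hfg]
        exact pv_sum_pick _ f _ (hnd.filter _)
          (List.mem_filter.2 ⟨hf, by simpa using hfg⟩)
  rw [congrArg List.sum (List.map_congr_left hinner), pv_sum_map_sub,
    pv_sum_pick friends f _ hnd hf,
    ← pv_sum_unpick friends f (fun g => ((gifts.map PySem.Str.split₀).count [g, f] : Int)),
    pv_count_split_first _ _ _ hnd hp, pv_count_split_second _ _ _ hnd hp]

-- ---- the pair loop ----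

theorem pv_win_modify (d : PySem.Dict String Int) (C : String → String → Int) (G : String → Int)
    (f1 f2 f : String) :
    (if C f1 f2 > C f2 f1 then d.modify f1 0 (· + 1)
      else if C f1 f2 < C f2 f1 then d.modify f2 0 (· + 1)
      else if G f1 > G f2 then d.modify f1 0 (· + 1)
      else if G f1 < G f2 then d.modify f2 0 (· + 1)
      else d).getD f 0
      = d.getD f 0 + (if pvWin C G f1 f2 = some f then 1 else 0) := by
  unfold pvWin
  by_cases hf1 : f = f1 <;> by_cases hf2 : f = f2 <;>
    split_ifs <;> simp_all [PySem.Dict.getD_modify]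

theorem pv_win_keys (d : PySem.Dict String Int) (C : String → String → Int) (G : String → Int)
    (f1 f2 : String) (h1 : f1 ∈ d.keys) (h2 : f2 ∈ d.keys) :
    (if C f1 f2 > C f2 f1 then d.modify f1 0 (· + 1)
      else if C f1 f2 < C f2 f1 then d.modify f2 0 (· + 1)
      else if G f1 > G f2 then d.modify f1 0 (· + 1)
      else if G f1 < G f2 then d.modify f2 0 (· + 1)
      else d).keys = d.keys := by
  have k1 : (d.modify f1 0 (· + 1)).keys = d.keys := by
    rw [PySem.Dict.keys_modify,
      PySem.Dict.keys_insert_of_contains _ _ ((PySem.Dict.contains_iff_mem_keys _ _).2 h1)]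
  have k2 : (d.modify f2 0 (· + 1)).keys = d.keys := by
    rw [PySem.Dict.keys_modify,
      PySem.Dict.keys_insert_of_contains _ _ ((PySem.Dict.contains_iff_mem_keys _ _).2 h2)]
  split_ifs <;> simp [k1, k2]

theorem pv_pair_inner (C : String → String → Int) (G : String → Int)
    (inner : List String) (f1 : String) (pre : List String)
    (st : PySem.Dict String Int × PySem.Set (String × String))
    (hnd : inner.Nodup) (_hf1 : f1 ∉ pre)
    (H1 : ∀ z, (z, f1) ∈ st.2 ↔ z ∈ pre)
    (H2 : ∀ y ∈ inner, (f1, y) ∉ st.2)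
    (hk1 : f1 ∈ st.1.keys) (hki : ∀ y ∈ inner, y ∈ st.1.keys) :
    (inner.foldl (pvA_pairBody C G f1) st).2
        = st.2 ++ (inner.filter (fun f2 => decide (f1 ≠ f2) && decide (f2 ∉ pre))).map
            (fun f2 => (f1, f2))
      ∧ (∀ f, (inner.foldl (pvA_pairBody C G f1) st).1.getD f 0
          = st.1.getD f 0
            + ((inner.filter (fun f2 => decide (f1 ≠ f2) && decide (f2 ∉ pre))).countP
                (fun f2 => decide (pvWin C G f1 f2 = some f)) : Int))
      ∧ (inner.foldl (pvA_pairBody C G f1) st).1.keys = st.1.keys := by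
  clear _hf1
  revert hnd H1 H2 hk1 hki
  induction inner generalizing st with
  | nil =>
      intro hnd H1 H2 hk1 hki
      simp
  | cons f2 t ih =>
      intro hnd H1 H2 hk1 hki
      have hndt := (List.nodup_cons.1 hnd).2
      have hf2t : f2 ∉ t := (List.nodup_cons.1 hnd).1
      simp only [List.foldl_cons]
      by_cases hcase : f1 ≠ f2 ∧ (f2, f1) ∉ st.2
      · obtain ⟨h12, hnmem⟩ := hcase
        have hf2pre : f2 ∉ pre := fun hp => hnmem ((H1 f2).2 hp)
        have hst2 : (pvA_pairBody C G f1 st f2).2 = st.2 ++ [(f1, f2)] := by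
          unfold pvA_pairBody
          rw [if_pos ⟨h12, hnmem⟩]
          show PySem.Set.add st.2 (f1, f2) = _
          unfold PySem.Set.add
          rw [if_neg (fun hc => H2 f2 List.mem_cons_self ((PySem.Set.contains_iff _ _).1 hc))]
        have hst1 : ∀ g, (pvA_pairBody C G f1 st f2).1.getD g 0
            = st.1.getD g 0 + (if pvWin C G f1 f2 = some g then 1 else 0) := by
          intro g
          unfold pvA_pairBody
          rw [if_pos ⟨h12, hnmem⟩]
          exact pv_win_modify st.1 C G f1 f2 g
        have hstk : (pvA_pairBody C G f1 st f2).1.keys = st.1.keys := by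
          unfold pvA_pairBody
          rw [if_pos ⟨h12, hnmem⟩]
          exact pv_win_keys st.1 C G f1 f2 hk1 (hki f2 List.mem_cons_self)
        have H1' : ∀ z, (z, f1) ∈ (pvA_pairBody C G f1 st f2).2 ↔ z ∈ pre := by
          intro z
          rw [hst2, List.mem_append]
          constructor
          · rintro (h | h)
            · exact (H1 z).1 h
            · exfalso
              have h' := List.mem_singleton.1 h
              injection h' with ha hb
              exact h12 hb
          · intro hz
            exact Or.inl ((H1 z).2 hz)
        have H2' : ∀ y ∈ t, (f1, y) ∉ (pvA_pairBody C G f1 st f2).2 := by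
          intro y hy hmem
          rw [hst2] at hmem
          rcases List.mem_append.1 hmem with h | h
          · exact H2 y (List.mem_cons_of_mem _ hy) h
          · have h' := List.mem_singleton.1 h
            injection h' with ha hb
            exact hf2t (hb ▸ hy)
        have hk1' : f1 ∈ (pvA_pairBody C G f1 st f2).1.keys := by rw [hstk]; exact hk1
        have hki' : ∀ y ∈ t, y ∈ (pvA_pairBody C G f1 st f2).1.keys := by
          intro y hy
          rw [hstk]
          exact hki y (List.mem_cons_of_mem _ hy)
        obtain ⟨ihs, ihv, ihk⟩ := ih (pvA_pairBody C G f1 st f2) hndt H1' H2' hk1' hki'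
        have hpred : (decide (f1 ≠ f2) && decide (f2 ∉ pre)) = true := by
          simp [h12, hf2pre]
        refine ⟨?_, ?_, ?_⟩
        · rw [ihs, hst2]
          simp only [List.filter_cons, hpred, if_pos, List.map_cons, List.append_assoc]
          rfl
        · intro f
          rw [ihv f, hst1 f]
          simp only [List.filter_cons, hpred, if_pos, List.countP_cons]
          by_cases hw : pvWin C G f1 f2 = some f
          · simp [hw]
            ring
          · simp [hw]
        · rw [ihk, hstk]
      · have hbody : pvA_pairBody C G f1 st f2 = st := by
          unfold pvA_pairBody
          rw [if_neg hcase]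
        rw [hbody]
        have hpred : (decide (f1 ≠ f2) && decide (f2 ∉ pre)) = false := by
          by_cases h12 : f1 = f2
          · simp [h12]
          · have hmem : (f2, f1) ∈ st.2 := by
              by_contra hmem
              exact hcase ⟨h12, hmem⟩
            simp [(H1 f2).1 hmem]
        simp only [List.filter_cons, hpred, Bool.false_eq_true, if_false]
        exact ih st hndt H1 (fun y hy => H2 y (List.mem_cons_of_mem _ hy)) hk1
          (fun y hy => hki y (List.mem_cons_of_mem _ hy))

theorem pv_pair_outer (C : String → String → Int) (G : String → Int)
    (friends : List String) (hnd : friends.Nodup) :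
    ∀ (post pre : List String) (st : PySem.Dict String Int × PySem.Set (String × String)),
    friends = pre ++ post →
    (∀ a b, (a, b) ∈ st.2 → a ∈ pre) →
    (∀ a ∈ pre, ∀ b ∈ friends, b ∉ pre → a ≠ b → (a, b) ∈ st.2) →
    st.1.keys = friends →
    (∀ f, (post.foldl (fun st f1 => friends.foldl (pvA_pairBody C G f1) st) st).1.getD f 0
        = st.1.getD f 0 + pvRounds C G friends f pre post)
      ∧ (post.foldl (fun st f1 => friends.foldl (pvA_pairBody C G f1) st) st).1.keys = friends := by
  intro post
  induction post with
  | nil =>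
      intro pre st _ _ _ hkeys
      refine ⟨fun f => ?_, hkeys⟩
      simp [pvRounds]
  | cons f1 post' ih =>
      intro pre st heq hI1 hI2 hkeys
      have hf1mem : f1 ∈ friends := by
        rw [heq]; exact List.mem_append_right _ List.mem_cons_self
      have hf1pre : f1 ∉ pre := by
        have hnd' := hnd
        rw [heq] at hnd'
        have hdis := (List.nodup_append.1 hnd').2.2
        exact fun hp => hdis f1 hp f1 List.mem_cons_self rfl
      have H1 : ∀ z, (z, f1) ∈ st.2 ↔ z ∈ pre := by
        intro z
        constructor
        · exact fun h => hI1 z f1 h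
        · intro hz
          exact hI2 z hz f1 hf1mem hf1pre (fun hzf => hf1pre (hzf ▸ hz))
      have H2 : ∀ y ∈ friends, (f1, y) ∉ st.2 := fun y _ h => hf1pre (hI1 f1 y h)
      obtain ⟨hs2, hval, hkeys'⟩ := pv_pair_inner C G friends f1 pre st hnd hf1pre H1 H2
        (by rw [hkeys]; exact hf1mem) (fun y hy => by rw [hkeys]; exact hy)
      have heq' : friends = (pre ++ [f1]) ++ post' := by rw [heq]; simp
      have hI1' : ∀ a b,
          (a, b) ∈ (friends.foldl (pvA_pairBody C G f1) st).2 → a ∈ pre ++ [f1] := by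
        intro a b hmem
        rw [hs2] at hmem
        rcases List.mem_append.1 hmem with h | h
        · exact List.mem_append_left _ (hI1 a b h)
        · obtain ⟨f2, _, hEq⟩ := List.mem_map.1 h
          injection hEq with ha hb
          exact List.mem_append_right _ (by rw [← ha]; exact List.mem_singleton.2 rfl)
      have hI2' : ∀ a ∈ pre ++ [f1], ∀ b ∈ friends, b ∉ pre ++ [f1] → a ≠ b →
          (a, b) ∈ (friends.foldl (pvA_pairBody C G f1) st).2 := by
        intro a ha b hb hbn hab
        have hbpre : b ∉ pre := fun hp => hbn (List.mem_append_left _ hp)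
        rw [hs2]
        rcases List.mem_append.1 ha with h | h
        · exact List.mem_append.2 (Or.inl (hI2 a h b hb hbpre hab))
        · have haf1 : a = f1 := List.mem_singleton.1 h
          have hbf1 : b ≠ f1 := fun hbf =>
            hbn (hbf ▸ List.mem_append_right _ (List.mem_singleton.2 rfl))
          refine List.mem_append.2 (Or.inr (List.mem_map.2 ⟨b, ?_, by rw [haf1]⟩))
          refine List.mem_filter.2 ⟨hb, ?_⟩
          have hf1b : f1 ≠ b := fun h' => hbf1 h'.symm
          simp [hf1b, hbpre]
      obtain ⟨ihv, ihk⟩ := ih (pre ++ [f1]) (friends.foldl (pvA_pairBody C G f1) st) heq'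
        hI1' hI2' (by rw [hkeys']; exact hkeys)
      simp only [List.foldl_cons]
      refine ⟨fun f => ?_, ihk⟩
      rw [ihv f, hval f]
      show _ = st.1.getD f 0 + pvRounds C G friends f pre (f1 :: post')
      rw [pvRounds]
      ring

-- ---- pvRounds closed form ----

theorem pv_filter_split (friends pre post : List String) (f1 : String)
    (h : friends = pre ++ post) (hnd : friends.Nodup) :
    friends.filter (fun f2 => decide (f1 ≠ f2) && decide (f2 ∉ pre))
      = post.filter (fun f2 => decide (f1 ≠ f2)) := by
  subst h
  rw [List.filter_append]
  have hdis := (List.nodup_append.1 hnd).2.2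
  have h1 : pre.filter (fun f2 => decide (f1 ≠ f2) && decide (f2 ∉ pre)) = [] := by
    rw [List.filter_eq_nil_iff]
    intro a ha
    simp [ha]
  have h2 : post.filter (fun f2 => decide (f1 ≠ f2) && decide (f2 ∉ pre))
      = post.filter (fun f2 => decide (f1 ≠ f2)) := by
    refine List.filter_congr ?_
    intro x hx
    have hxp : x ∉ pre := fun hp => hdis x hp x hx rfl
    simp [hxp]
  rw [h1, h2, List.nil_append]

theorem pv_win_left (C : String → String → Int) (G : String → Int) (a b : String) (h : a ≠ b) :
    (pvWin C G a b = some a) ↔ pvBeatsF C G a b = true := by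
  unfold pvWin pvBeatsF
  split_ifs <;> simp_all [Ne.symm h] <;> omega

theorem pv_win_right (C : String → String → Int) (G : String → Int) (a b : String) (h : a ≠ b) :
    (pvWin C G a b = some b) ↔ pvBeatsF C G b a = true := by
  unfold pvWin pvBeatsF
  split_ifs <;> simp_all <;> omega

theorem pv_win_other (C : String → String → Int) (G : String → Int) (a b f : String)
    (ha : f ≠ a) (hb : f ≠ b) : pvWin C G a b ≠ some f := by
  unfold pvWin
  split_ifs <;> simp [Ne.symm ha, Ne.symm hb]

theorem pv_rounds_zero (C : String → String → Int) (G : String → Int)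
    (friends : List String) (f : String) (hnd : friends.Nodup) :
    ∀ (post pre : List String), friends = pre ++ post → f ∈ pre →
      pvRounds C G friends f pre post = 0 := by
  intro post
  induction post with
  | nil => intro pre _ _; rfl
  | cons f1 post' ih =>
      intro pre heq hf
      have hnd' := hnd
      rw [heq] at hnd'
      have hdis := (List.nodup_append.1 hnd').2.2
      have hf1pre : f1 ∉ pre := fun hp => hdis f1 hp f1 List.mem_cons_self rfl
      rw [pvRounds]
      have hcount : ((friends.filter (fun f2 => decide (f1 ≠ f2) && decide (f2 ∉ pre))).countP
          (fun f2 => decide (pvWin C G f1 f2 = some f))) = 0 := by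
        rw [List.countP_eq_zero]
        intro f2 hf2
        obtain ⟨_, hpred⟩ := List.mem_filter.1 hf2
        have hpred' : f1 ≠ f2 ∧ f2 ∉ pre := by simpa using hpred
        have hne1 : f ≠ f1 := fun h => hf1pre (h ▸ hf)
        have hne2 : f ≠ f2 := fun h => hpred'.2 (h ▸ hf)
        simp [pv_win_other C G f1 f2 f hne1 hne2]
      rw [hcount]
      simpa using ih (pre ++ [f1]) (by rw [heq]; simp) (List.mem_append_left _ hf)

theorem pv_rounds_eq (C : String → String → Int) (G : String → Int)
    (friends : List String) (f : String) (hnd : friends.Nodup) (hf : f ∈ friends) :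
    ∀ (post pre : List String), friends = pre ++ post → f ∉ pre →
      pvRounds C G friends f pre post
        = ((post.filter (fun g => decide (g ≠ f))).countP (fun g => pvBeatsF C G f g) : Int) := by
  intro post
  induction post with
  | nil =>
      intro pre heq hfpre
      exact absurd (heq ▸ hf) (by simpa using hfpre)
  | cons f1 post' ih =>
      intro pre heq hfpre
      have hnd' := hnd
      rw [heq] at hnd'
      have hdis := (List.nodup_append.1 hnd').2.2
      have hndpost : post'.Nodup := (List.nodup_cons.1 (List.nodup_append.1 hnd').2.1).2
      have hf1post : f1 ∉ post' := (List.nodup_cons.1 (List.nodup_append.1 hnd').2.1).1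
      have hf1pre : f1 ∉ pre := fun hp => hdis f1 hp f1 List.mem_cons_self rfl
      rw [pvRounds, pv_filter_split friends pre (f1 :: post') f1 heq hnd,
        List.filter_cons_of_neg (by simp)]
      by_cases hff1 : f = f1
      · subst hff1
        have hcong : ((post'.filter (fun f2 => decide (f ≠ f2))).countP
              (fun f2 => decide (pvWin C G f f2 = some f)))
            = ((post'.filter (fun f2 => decide (f ≠ f2))).countP (fun f2 => pvBeatsF C G f f2)) := by
          refine List.countP_congr ?_
          intro x hx
          have hxne : f ≠ x := by simpa using (List.mem_filter.1 hx).2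
          simp only [decide_eq_true_eq]
          exact pv_win_left C G f x hxne
        rw [hcong, pv_rounds_zero C G friends f hnd post' (pre ++ [f]) (by rw [heq]; simp)
          (by simp), List.filter_cons_of_neg (by simp)]
        have hfcg : post'.filter (fun f2 => decide (f ≠ f2))
            = post'.filter (fun g => decide (g ≠ f)) := by
          refine List.filter_congr ?_
          intro x _
          simp [ne_comm]
        rw [hfcg]
        ring
      · have hf1f : f1 ≠ f := fun h => hff1 h.symm
        have hfpost : f ∈ post' := by
          have hf' := hf
          rw [heq] at hf'
          rcases List.mem_append.1 hf' with h | h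
          · exact absurd h hfpre
          · rcases List.mem_cons.1 h with h' | h'
            · exact absurd h' hff1
            · exact h'
        have hcount : ((post'.filter (fun f2 => decide (f1 ≠ f2))).countP
              (fun f2 => decide (pvWin C G f1 f2 = some f)))
            = if pvBeatsF C G f f1 = true then 1 else 0 := by
          have hcong : ((post'.filter (fun f2 => decide (f1 ≠ f2))).countP
                (fun f2 => decide (pvWin C G f1 f2 = some f)))
              = ((post'.filter (fun f2 => decide (f1 ≠ f2))).countP
                (fun f2 => decide (f2 = f) && pvBeatsF C G f f1)) := by
            refine List.countP_congr ?_
            intro x _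
            by_cases hxf : x = f
            · subst hxf
              simp only [decide_eq_true_eq, decide_true, Bool.true_and]
              exact (pv_win_right C G f1 x hf1f).trans (by simp)
            · have hfx : f ≠ x := fun h => hxf h.symm
              simp [pv_win_other C G f1 x f hff1 hfx, hxf]
          rw [hcong]
          by_cases hb : pvBeatsF C G f f1 = true
          · rw [if_pos hb]
            simp only [hb, Bool.and_true]
            have hcp : ((post'.filter (fun f2 => decide (f1 ≠ f2))).countP
                  (fun f2 => decide (f2 = f)))
                = ((post'.filter (fun f2 => decide (f1 ≠ f2))).count f) := by
              rw [List.count_eq_countP]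
              exact List.countP_congr (fun x _ => by simp)
            rw [hcp, List.count_filter (by simpa using hf1f),
              List.count_eq_one_of_mem hndpost hfpost]
          · rw [if_neg hb, List.countP_eq_zero]
            intro a _
            simp [show pvBeatsF C G f f1 = false by simpa using hb]
        rw [hcount]
        have ihv := ih (pre ++ [f1]) (by rw [heq]; simp)
          (by simp [hfpre, hff1])
        rw [ihv, List.filter_cons_of_pos (by simpa using hf1f), List.countP_cons]
        push_cast
        by_cases hb : pvBeatsF C G f f1 = true
        · simp [hb]
          ring
        · simp [hb]

-- ---- the gifts = [] case (admitted by Pre_ even for duplicate friends) ----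

theorem pv_max_zero (l : List Int) (h0 : ∀ v ∈ l, v = 0) (hne : l ≠ []) :
    PySem.List.max? l (fun x => x) = some 0 := by
  cases l with
  | nil => exact absurd rfl hne
  | cons v t =>
      rw [PySem.List.max?_id_cons]
      have hv : v = 0 := h0 v List.mem_cons_self
      rcases PySem.List.foldl_max_mem t v with h | h
      · rw [h, hv]
      · rw [h0 _ (List.mem_cons_of_mem _ h)]

theorem pv_geInit_getD_zero (friends : List String) (a b : String) :
    ((pvA_geInit friends).getD a PySem.Dict.empty).getD b 0 = 0 := by
  unfold pvA_geInit
  have aux : ∀ (l : List String) (d : PySem.Dict String (PySem.Dict String Int)),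
      (d.getD a PySem.Dict.empty).getD b 0 = 0 →
      (((l.foldl (fun d f => d.insert f (pvA_innerInit friends f)) d).getD a
        PySem.Dict.empty).getD b 0 = 0) := by
    intro l
    induction l with
    | nil => intro d h; exact h
    | cons x t ih =>
        intro d h
        simp only [List.foldl_cons]
        apply ih
        rw [PySem.Dict.getD_insert]
        split
        · unfold pvA_innerInit
          exact pv_innerInit_getD _ _ _ _ (PySem.Dict.getD_empty _ _)
        · exact h
  exact aux friends PySem.Dict.empty (by rw [PySem.Dict.getD_empty, PySem.Dict.getD_empty])

theorem pv_gi_empty_zero (friends : List String) (f : String) :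
    (pvA_gi friends []).getD f 0 = 0 := by
  unfold pvA_gi pvA_ge
  simp only [List.foldl_nil]
  have aux : ∀ (l : List String) (acc : PySem.Dict String Int),
      (∀ f', acc.getD f' 0 = 0) → ∀ f',
      (l.foldl (fun acc giver =>
        ((pvA_geInit friends).getD giver PySem.Dict.empty).keys.foldl (fun acc receiver =>
          (acc.modify giver 0
              (· + ((pvA_geInit friends).getD giver PySem.Dict.empty).getD receiver 0)).modify
            receiver 0
            (fun v => v - ((pvA_geInit friends).getD giver PySem.Dict.empty).getD receiver 0))
          acc) acc).getD f' 0 = 0 := by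
    intro l
    induction l with
    | nil => intro acc h f'; exact h f'
    | cons gv t ih =>
        intro acc h f'
        simp only [List.foldl_cons]
        apply ih
        intro f''
        rw [pv_gi_inner]
        have hz : (((pvA_geInit friends).getD gv PySem.Dict.empty).keys.map (fun r =>
            (if f'' = gv then ((pvA_geInit friends).getD gv PySem.Dict.empty).getD r 0 else 0)
              - (if f'' = r then ((pvA_geInit friends).getD gv PySem.Dict.empty).getD r 0
                else 0))).sum
            = (((pvA_geInit friends).getD gv PySem.Dict.empty).keys.map
                (fun _ => (0 : Int))).sum := by
          refine congrArg List.sum (List.map_congr_left ?_)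
          intro r _
          rw [pv_geInit_getD_zero]
          split_ifs <;> ring
        rw [hz, h f'']
        simp
  exact aux _ (pvA_zeroDict friends) (fun f' => pv_zeroDict_getD friends f') f

theorem pv_pair_empty_fst (friends : List String)
    (C : String → String → Int) (G : String → Int)
    (hC : ∀ a b, C a b = 0) (hG : ∀ a, G a = 0) :
    ∀ (post : List String) (st : PySem.Dict String Int × PySem.Set (String × String)),
      (post.foldl (fun st f1 => friends.foldl (pvA_pairBody C G f1) st) st).1 = st.1 := by
  have hbody : ∀ f1 st f2, (pvA_pairBody C G f1 st f2).1 = st.1 := by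
    intro f1 st f2
    unfold pvA_pairBody
    split
    · simp only [hC, hG]
      norm_num
    · rfl
  have hinner : ∀ f1 (l : List String) st, (l.foldl (pvA_pairBody C G f1) st).1 = st.1 := by
    intro f1 l
    induction l with
    | nil => intro st; rfl
    | cons x t ih =>
        intro st
        simp only [List.foldl_cons]
        rw [ih, hbody]
  intro post
  induction post with
  | nil => intro st; rfl
  | cons f1 t ih =>
      intro st
      simp only [List.foldl_cons]
      rw [ih, hinner]

theorem pv_zeroDict_values (friends : List String) :
    ∀ v ∈ (pvA_zeroDict friends).values, v = 0 := by
  unfold pvA_zeroDict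
  have aux : ∀ (l : List String) (d : PySem.Dict String Int),
      (∀ v ∈ d.values, v = 0) →
      ∀ v ∈ (l.foldl (fun d f => d.insert f (0 : Int)) d).values, v = 0 := by
    intro l
    induction l with
    | nil => intro d h; exact h
    | cons x t ih =>
        intro d h
        simp only [List.foldl_cons]
        refine ih _ ?_
        intro v hv
        rcases PySem.Dict.mem_values_insert _ _ _ _ hv with h' | h'
        · exact h'
        · exact h v h'
  exact aux friends PySem.Dict.empty
    (by intro v hv; simp [PySem.Dict.values, PySem.Dict.empty] at hv)

theorem pv_zeroDict_values_ne_nil (friends : List String) (hne : friends ≠ []) :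
    (pvA_zeroDict friends).values ≠ [] := by
  have hkeys : (pvA_zeroDict friends).keys = PySem.Set.ofList friends := by
    unfold pvA_zeroDict
    rw [PySem.Dict.keys_foldl_insert _ (fun _ _ => (0 : Int)), PySem.Dict.keys_empty]
    rfl
  have hk : (pvA_zeroDict friends).keys ≠ [] := by
    cases friends with
    | nil => exact absurd rfl hne
    | cons x t =>
        rw [hkeys]
        intro h
        have hx : x ∈ PySem.Set.ofList (x :: t) := (PySem.Set.mem_ofList _ _).2 List.mem_cons_self
        rw [h] at hx
        exact absurd hx List.not_mem_nil
    

  intro hv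
  apply hk
  have hlen : (pvA_zeroDict friends).keys.length = (pvA_zeroDict friends).values.length := by
    simp [PySem.Dict.keys, PySem.Dict.values]
  rw [hv] at hlen
  exact List.eq_nil_of_length_eq_zero (by simpa using hlen)

theorem pv_empty_A (friends : List String) (hne : friends ≠ []) : solution friends [] = 0 := by
  unfold solution
  have hC : ∀ a b : String, ((pvA_ge friends []).getD a PySem.Dict.empty).getD b 0 = 0 := by
    intro a b
    unfold pvA_ge
    simp only [List.foldl_nil]
    exact pv_geInit_getD_zero friends a b
  have hG : ∀ a : String, (pvA_gi friends []).getD a 0 = 0 := pv_gi_empty_zero friends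
  rw [pv_pair_empty_fst friends _ _ hC hG friends
    (pvA_zeroDict friends, (PySem.Set.empty : PySem.Set (String × String)))]
  rw [pv_max_zero _ (pv_zeroDict_values friends) (pv_zeroDict_values_ne_nil friends hne)]

theorem pv_empty_B (friends : List String) (hne : friends ≠ []) : solution_alt friends [] = 0 := by
  unfold solution_alt
  have hidx : ∀ f : String, (pvB_index friends ([] : List (List String))).getD f 0 = 0 := by
    intro f
    unfold pvB_index
    simp only [List.foldl_nil]
    exact pv_foldl_insert_zero_getD _ _ _ (PySem.Dict.getD_empty _ _)
  have hbeats : ∀ a b : String,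
      pvB_beats ([] : List (List String)) (pvB_index friends ([] : List (List String))) a b
        = false := by
    intro a b
    unfold pvB_beats pvB_count
    simp [hidx]
  have hmap : friends.map (fun f =>
      (friends.countP (fun g => decide (g ≠ f)
        && pvB_beats (([] : List String).map (fun g' => PySem.Str.split₀ g'))
          (pvB_index friends (([] : List String).map (fun g' => PySem.Str.split₀ g'))) f g) : Int))
      = friends.map (fun _ => (0 : Int)) := by
    refine List.map_congr_left ?_
    intro f _
    simp only [List.map_nil, hbeats, Bool.and_false]
    simp
  rw [hmap]
  have hne' : friends.map (fun _ => (0 : Int)) ≠ [] := by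
    cases friends with
    | nil => exact absurd rfl hne
    | cons x t => simp
  rw [pv_max_zero _ (by
    intro v hv
    obtain ⟨x, _, hxe⟩ := List.mem_map.1 hv
    exact hxe.symm) hne']

-- ---- final assembly ----

theorem pvB_index_getD (friends gifts : List String)
    (hg : ∀ g ∈ gifts, ∃ a ∈ friends, ∃ b ∈ friends, a ≠ b ∧ PySem.Str.split₀ g = [a, b])
    (f : String) :
    (pvB_index friends (gifts.map PySem.Str.split₀)).getD f 0
      = ((gifts.map PySem.Str.split₀).countP (fun p => PySem.List.pyGetD p 0 "" == f) : Int)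
        - ((gifts.map PySem.Str.split₀).countP (fun p => PySem.List.pyGetD p 1 "" == f) : Int) := by
  have hshape : ∀ p ∈ gifts.map PySem.Str.split₀, ∃ a b : String, p = [a, b] := by
    intro p hpm
    obtain ⟨g, hgm, rfl⟩ := List.mem_map.1 hpm
    obtain ⟨a, _, b, _, _, hs⟩ := hg g hgm
    exact ⟨a, b, hs⟩
  have aux : ∀ (ps : List (List String)) (d : PySem.Dict String Int),
      (∀ p ∈ ps, ∃ a b : String, p = [a, b]) →
      (ps.foldl (fun d p =>
          match p with
          | [a, b] => (d.modify a 0 (· + 1)).modify b 0 (fun v => v - 1)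
          | _ => d) d).getD f 0
        = d.getD f 0 + (ps.countP (fun p => PySem.List.pyGetD p 0 "" == f) : Int)
          - (ps.countP (fun p => PySem.List.pyGetD p 1 "" == f) : Int) := by
    intro ps
    induction ps with
    | nil => intro d _; simp
    | cons p rest ih =>
        intro d hsh
        obtain ⟨a, b, rfl⟩ := hsh p List.mem_cons_self
        simp only [List.foldl_cons, List.countP_cons]
        rw [ih _ (fun q hq => hsh q (List.mem_cons_of_mem _ hq))]
        have h0 : PySem.List.pyGetD [a, b] 0 "" = a := by
          simp [PySem.List.pyGetD, PySem.List.pyGet?, PySem.List.pyIdx?]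
        have h1 : PySem.List.pyGetD [a, b] 1 "" = b := by
          simp [PySem.List.pyGetD, PySem.List.pyGet?, PySem.List.pyIdx?]
        rw [h0, h1]
        simp only [PySem.Dict.getD_modify, beq_iff_eq]
        split_ifs <;> subst_vars <;> push_cast <;> first | omega | (exfalso; simp_all)
  unfold pvB_index
  rw [aux _ _ hshape, pv_foldl_insert_zero_getD _ _ _ (PySem.Dict.getD_empty _ _)]
  ring

theorem pv_beats_eq (friends gifts : List String) (hnd : friends.Nodup)
    (hg : ∀ g ∈ gifts, ∃ a ∈ friends, ∃ b ∈ friends, a ≠ b ∧ PySem.Str.split₀ g = [a, b])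
    (a b : String) (ha : a ∈ friends) (hb : b ∈ friends) :
    pvBeatsF (fun x y => ((pvA_ge friends gifts).getD x PySem.Dict.empty).getD y 0)
        (fun x => (pvA_gi friends gifts).getD x 0) a b
      = pvB_beats (gifts.map (fun g => PySem.Str.split₀ g))
          (pvB_index friends (gifts.map (fun g => PySem.Str.split₀ g))) a b := by
  simp only [pvBeatsF, pvB_beats, pvB_count]
  simp only [pv_geA_count friends gifts hnd a ha, pv_geA_count friends gifts hnd b hb,
    pv_gi_eq_index friends gifts hnd hg a ha, pv_gi_eq_index friends gifts hnd hg b hb,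
    pvB_index_getD friends gifts hg]
  rfl

-- ===== VERDICT (by name: the statement is the Claim_ definition above) =====
theorem solution_spec : Claim_equal_solution := by
  intro friends gifts _ hpre
  obtain ⟨hne, hnd', hg⟩ := hpre
  rcases hnd' with hnd | hge
  case inr =>
    subst hge
    show solution friends [] = solution_alt friends []
    rw [pv_empty_A friends hne, pv_empty_B friends hne]
  show solution friends gifts = solution_alt friends gifts
  unfold solution solution_alt
  have hmain : (friends.foldl (fun st f1 =>
          friends.foldl
            (pvA_pairBody (fun a b => ((pvA_ge friends gifts).getD a PySem.Dict.empty).getD b 0)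
              (fun f => (pvA_gi friends gifts).getD f 0) f1) st)
        (pvA_zeroDict friends, (PySem.Set.empty : PySem.Set (String × String)))).1.values
      = friends.map (fun f =>
          (friends.countP (fun g => decide (g ≠ f)
            && pvB_beats (gifts.map (fun g' => PySem.Str.split₀ g'))
              (pvB_index friends (gifts.map (fun g' => PySem.Str.split₀ g'))) f g) : Int)) := by
    obtain ⟨hval, hkeys⟩ := pv_pair_outer
      (fun a b => ((pvA_ge friends gifts).getD a PySem.Dict.empty).getD b 0)
      (fun f => (pvA_gi friends gifts).getD f 0) friends hnd friends []
      (pvA_zeroDict friends, (PySem.Set.empty : PySem.Set (String × String)))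
      (List.nil_append _).symm
      (by intro a b h; exact absurd h List.not_mem_nil)
      (by intro a ha; exact absurd ha List.not_mem_nil)
      (pv_zeroDict_keys friends hnd)
    rw [PySem.Dict.values_eq_map_keys _ (by rw [hkeys]; exact hnd) 0, hkeys]
    refine List.map_congr_left ?_
    intro f hfm
    rw [hval f]
    show (pvA_zeroDict friends).getD f 0 + _ = _
    rw [pv_zeroDict_getD, pv_rounds_eq
      (fun a b => ((pvA_ge friends gifts).getD a PySem.Dict.empty).getD b 0)
      (fun f => (pvA_gi friends gifts).getD f 0) friends f hnd hfm friends []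
      (List.nil_append _).symm List.not_mem_nil, zero_add]
    congr 1
    rw [List.countP_filter]
    refine List.countP_congr ?_
    intro g hgm
    rw [pv_beats_eq friends gifts hnd hg f g hfm hgm, Bool.and_comm]
  rw [hmain]
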